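-- pv_equiv track=rewrite | github.com/usmanaaa/csc256-mp1 | Zara/main.py | hasDivisors
-- ===== SOURCE A (Python) =====
-- def hasDivisors(num,f):
--     divisors = []
--     largest_digit = 7
--
--     if type(num) == int:
--         for i in range(1, num + 1):
--             if num % i == 0:
--                 divisors.append(i)
--
--         if len(divisors) == f and largest_digit in divisors:
--             return True
--         else:
--             return False
--     else:
--         return False
-- ===== SOURCE B (Python) =====
-- def hasDivisors(num, f):
--     if num <= 0 or num % 7 != 0:
--         return False
--     count = 0
--     k = 1
--     while k * k <= num:
--         if num % k == 0:
--             count += 1 if k * k == num else 2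
--         k += 1
--     return count == f
-- ===== Notes on version B (the rewrite author's own statement) =====
-- stated objective: faster
-- what changed: Instead of enumerating all i in 1..num to collect the divisor list, B first tests num % 7 == 0 (the '7 in divisors' condition) and then counts divisors by pairing d with num/d up to sqrt(num), comparing the count with f.
import Mathlib
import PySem

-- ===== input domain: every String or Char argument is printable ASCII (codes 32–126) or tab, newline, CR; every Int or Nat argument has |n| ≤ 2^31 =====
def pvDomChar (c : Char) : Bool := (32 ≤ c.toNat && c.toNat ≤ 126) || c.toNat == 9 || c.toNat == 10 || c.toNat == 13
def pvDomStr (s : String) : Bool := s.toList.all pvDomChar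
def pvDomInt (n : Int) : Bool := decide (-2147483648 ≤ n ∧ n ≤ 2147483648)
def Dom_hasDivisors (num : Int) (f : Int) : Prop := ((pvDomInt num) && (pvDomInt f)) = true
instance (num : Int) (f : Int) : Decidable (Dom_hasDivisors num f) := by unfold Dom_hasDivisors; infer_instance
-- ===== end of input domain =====

-- B replaces A's full 1..num divisor-list scan by a %7 test plus a sqrt-paired divisor count (asymptotically faster).

-- ===== PORT A =====
def hasDivisors (num : Int) (f : Int) : Bool :=
  -- divisors = []; for i in range(1, num+1): if num % i == 0: divisors.append(i)
  let divisors : List Int :=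
    (PySem.List.pyRange 1 (num + 1) 1).foldl
      (fun acc i => if PySem.Int.mod num i == 0 then acc ++ [i] else acc) []
  -- type(num) == int is always true under the Int typing
  if (divisors.length : Int) = f ∧ (7 : Int) ∈ divisors then true else false

-- ===== PORT B =====
-- while k*k <= num: if num % k == 0: count += 1 if k*k == num else 2; k += 1
def pvCountDivs (num : Int) (k : Int) (count : Int) : Int :=
  if h : k * k ≤ num then
    pvCountDivs num (k + 1)
      (if PySem.Int.mod num k == 0 then count + (if k * k == num then 1 else 2) else count)
  else count
termination_by (num + 1 - k).toNat
decreasing_by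
  have hk : k ≤ num := by nlinarith [mul_self_nonneg k, mul_self_nonneg (k - 1)]
  omega

def hasDivisors_alt (num : Int) (f : Int) : Bool :=
  if num ≤ 0 ∨ ¬ (PySem.Int.mod num 7 = 0) then false
  else pvCountDivs num 1 0 = f

-- ===== PRECONDITION & SPEC =====
def Spec_hasDivisors (num : Int) (f : Int) (out : Bool) : Prop := out = hasDivisors_alt num f
instance (num : Int) (f : Int) (out : Bool) : Decidable (Spec_hasDivisors num f out) := by unfold Spec_hasDivisors; infer_instance

-- ===== CLAIM (what is proved, stated in full; the proofs are below) =====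
def Claim_equal_hasDivisors : Prop := ∀ (num : Int) (f : Int), Dom_hasDivisors num f → Spec_hasDivisors num f (hasDivisors num f)

-- ===== LEMMAS AND PROOFS =====

-- A's foldl builds exactly the filtered range.
theorem pvDivList (num : Int) :
    (PySem.List.pyRange 1 (num + 1) 1).foldl
      (fun acc i => if PySem.Int.mod num i == 0 then acc ++ [i] else acc) []
    = (PySem.List.pyRange 1 (num + 1) 1).filter (fun i => PySem.Int.mod num i == 0) := by
  simpa using PySem.List.foldl_append_if_eq_filter
    (l := PySem.List.pyRange 1 (num + 1) 1) (p := fun i => PySem.Int.mod num i == 0) (acc := [])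

-- basic facts about a divisor d of n and its cofactor n / d
theorem pvDivFacts (n d : ℕ) (hn : n ≠ 0) (hd : d ∣ n) :
    0 < d ∧ 0 < n / d ∧ d * (n / d) = n ∧ n / (n / d) = d := by
  obtain ⟨e, he⟩ := hd
  have hd0 : 0 < d := by
    rcases Nat.eq_zero_or_pos d with h | h
    · exfalso; subst h; simp at he; omega
    · exact h
  have hnd : n / d = e := by rw [he, Nat.mul_div_cancel_left _ hd0]
  have he0 : 0 < e := by
    rcases Nat.eq_zero_or_pos e with h | h
    · exfalso; subst h; simp at he; omega
    · exact h
  refine ⟨hd0, by omega, by rw [hnd]; omega, ?_⟩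
  rw [hnd, he, Nat.mul_div_cancel _ he0]

-- sqrt pairing: #divisors = 2·#{d ∈ divisors | d² < n} + #{d ∈ divisors | d² = n}
theorem pvPairing (n : ℕ) (hn : 1 ≤ n) :
    n.divisors.card
    = 2 * (n.divisors.filter (fun d => d * d < n)).card
      + (n.divisors.filter (fun d => d * d = n)).card := by
  have hnn : n ≠ 0 := by omega
  have h1 : (n.divisors.filter (fun d => d * d < n)).card
      + (n.divisors.filter (fun d => ¬ d * d < n)).card = n.divisors.card :=
    Finset.card_filter_add_card_filter_not _
  have h2 : ((n.divisors.filter (fun d => ¬ d * d < n)).filter (fun d => d * d = n)).card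
      + ((n.divisors.filter (fun d => ¬ d * d < n)).filter (fun d => ¬ d * d = n)).card
      = (n.divisors.filter (fun d => ¬ d * d < n)).card :=
    Finset.card_filter_add_card_filter_not _
  have e2 : (n.divisors.filter (fun d => ¬ d * d < n)).filter (fun d => d * d = n)
      = n.divisors.filter (fun d => d * d = n) := by
    rw [Finset.filter_filter]
    apply Finset.filter_congr; intro d _
    constructor
    · rintro ⟨_, h⟩; exact h
    · intro h; exact ⟨by omega, h⟩
  have e3 : (n.divisors.filter (fun d => ¬ d * d < n)).filter (fun d => ¬ d * d = n)
      = n.divisors.filter (fun d => n < d * d) := by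
    rw [Finset.filter_filter]
    apply Finset.filter_congr; intro d _
    constructor
    · rintro ⟨ha, hb⟩; omega
    · intro h; constructor <;> omega
  have hbij : (n.divisors.filter (fun d => n < d * d)).card
      = (n.divisors.filter (fun d => d * d < n)).card := by
    apply Finset.card_nbij' (i := fun d => n / d) (j := fun d => n / d)
    · intro d hd
      simp only [Finset.coe_filter, Set.mem_setOf_eq, Nat.mem_divisors] at hd ⊢
      obtain ⟨⟨hdvd, _⟩, hlt⟩ := hd
      obtain ⟨hd0, he0, hprod, hinv⟩ := pvDivFacts n d hnn hdvd
      refine ⟨⟨⟨d, by rw [Nat.mul_comm]; omega⟩, hnn⟩, ?_⟩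
      nlinarith
    · intro d hd
      simp only [Finset.coe_filter, Set.mem_setOf_eq, Nat.mem_divisors] at hd ⊢
      obtain ⟨⟨hdvd, _⟩, hlt⟩ := hd
      obtain ⟨hd0, he0, hprod, hinv⟩ := pvDivFacts n d hnn hdvd
      refine ⟨⟨⟨d, by rw [Nat.mul_comm]; omega⟩, hnn⟩, ?_⟩
      nlinarith
    · intro d hd
      simp only [Finset.coe_filter, Set.mem_setOf_eq, Nat.mem_divisors] at hd
      exact (pvDivFacts n d hnn hd.1.1).2.2.2
    · intro d hd
      simp only [Finset.coe_filter, Set.mem_setOf_eq, Nat.mem_divisors] at hd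
      exact (pvDivFacts n d hnn hd.1.1).2.2.2
  rw [e2, e3] at h2
  omega

-- splitting a "j ≤ d" filter at d = j
theorem pvCardFilterSucc (S : Finset ℕ) (j : ℕ) (P : ℕ → Prop) [DecidablePred P] :
    (S.filter (fun d => j ≤ d ∧ P d)).card
    = (S.filter (fun d => j + 1 ≤ d ∧ P d)).card + (if j ∈ S ∧ P j then 1 else 0) := by
  have hsplit : S.filter (fun d => j ≤ d ∧ P d)
      = S.filter (fun d => (j + 1 ≤ d ∧ P d) ∨ (d = j ∧ P d)) := by
    apply Finset.filter_congr
    intro d _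
    constructor
    · rintro ⟨h1, h2⟩
      rcases Nat.lt_or_ge j d with h | h
      · exact Or.inl ⟨h, h2⟩
      · exact Or.inr ⟨le_antisymm h h1, h2⟩
    · rintro (⟨h1, h2⟩ | ⟨h1, h2⟩) <;> exact ⟨by omega, h2⟩
  rw [hsplit, Finset.filter_or, Finset.card_union_of_disjoint]
  · congr 1
    by_cases hj : j ∈ S ∧ P j
    · rw [if_pos hj]
      have : S.filter (fun d => d = j ∧ P d) = {j} := by
        apply Finset.ext
        intro d
        simp only [Finset.mem_filter, Finset.mem_singleton]
        constructor
        · rintro ⟨_, h1, _⟩; exact h1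
        · rintro rfl; exact ⟨hj.1, rfl, hj.2⟩
      rw [this]; rfl
    · rw [if_neg hj]
      have : S.filter (fun d => d = j ∧ P d) = ∅ := by
        apply Finset.ext
        intro d
        simp only [Finset.mem_filter, Finset.notMem_empty, iff_false]
        rintro ⟨hd, rfl, hp⟩
        exact hj ⟨hd, hp⟩
      rw [this]; rfl
  · simp only [Finset.disjoint_left, Finset.mem_filter]
    rintro d ⟨_, h1, _⟩ ⟨_, h2, _⟩
    omega

-- invariant of B's while loop: pvCountDivs counts the divisors ≥ j paired across √n
theorem pvCountDivsInv (n : ℕ) (hn : 1 ≤ n) :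
    ∀ (m j : ℕ), 1 ≤ j → m = n + 1 - j → ∀ (c : Int),
      pvCountDivs (n : Int) (j : Int) c
      = c + 2 * ((n.divisors.filter (fun d => j ≤ d ∧ d * d < n)).card : Int)
          + ((n.divisors.filter (fun d => j ≤ d ∧ d * d = n)).card : Int) := by
  intro m
  induction m with
  | zero =>
    intro j hj hm c
    have hjn : n + 1 ≤ j := by omega
    have hguard : ¬ ((j : Int) * (j : Int) ≤ (n : Int)) := by
      have : n < j * j := by nlinarith
      exact_mod_cast not_le.mpr (by exact_mod_cast this)
    rw [pvCountDivs, dif_neg hguard]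
    have hempty : ∀ (P : ℕ → Prop) [DecidablePred P],
        (∀ d, P d → ¬ (n < d * d)) → n.divisors.filter (fun d => j ≤ d ∧ P d) = ∅ := by
      intro P _ hP
      rw [Finset.filter_eq_empty_iff]
      rintro d hd ⟨h1, h2⟩
      exact hP d h2 (by nlinarith)
    rw [hempty _ (fun d h => by omega), hempty _ (fun d h => by omega)]
    simp
  | succ m ih =>
    intro j hj hm c
    by_cases hguard : (j : Int) * (j : Int) ≤ (n : Int)
    · have hjjn : j * j ≤ n := by exact_mod_cast hguard
      have hjn : j ≤ n := by nlinarith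
      rw [pvCountDivs, dif_pos hguard]
      have hstep : ((j : Int) + 1) = ((j + 1 : ℕ) : Int) := by push_cast; ring
      rw [hstep, ih (j + 1) (by omega) (by omega)]
      have hmodeq : (PySem.Int.mod (n : Int) (j : Int) == 0) = decide (j ∣ n) := by
        rw [PySem.Int.mod_natCast]
        by_cases h : j ∣ n
        · obtain ⟨e, rfl⟩ := h
          simp [Nat.mul_mod_right]
        · simp [h]
          exact_mod_cast h
      have hsqeq : ((j : Int) * (j : Int) == (n : Int)) = decide (j * j = n) := by
        by_cases h : j * j = n
        · simp [h]; exact_mod_cast h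
        · simp [h]; intro hc; exact h (by exact_mod_cast hc)
      rw [hmodeq, hsqeq]
      rw [pvCardFilterSucc n.divisors j (fun d => d * d < n),
          pvCardFilterSucc n.divisors j (fun d => d * d = n)]
      have hmem : j ∈ n.divisors ↔ j ∣ n := by
        rw [Nat.mem_divisors]; exact ⟨fun h => h.1, fun h => ⟨h, by omega⟩⟩
      by_cases hdvd : j ∣ n
      · by_cases hsq : j * j = n
        · simp only [hdvd, hsq, decide_true, if_pos, hmem, true_and, and_true]
          simp
          ring
        · simp only [hdvd, hsq, decide_true, decide_false, if_pos, hmem]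
          simp [show j * j < n by omega]
          ring
      · simp only [hdvd, decide_false, Bool.false_eq_true, if_false, hmem]
        simp
    · rw [pvCountDivs, dif_neg hguard]
      have hjjn : ¬ (j * j ≤ n) := fun h => hguard (by exact_mod_cast h)
      have hempty : ∀ (P : ℕ → Prop) [DecidablePred P],
          (∀ d, P d → d * d ≤ n) → n.divisors.filter (fun d => j ≤ d ∧ P d) = ∅ := by
        intro P _ hP
        rw [Finset.filter_eq_empty_iff]
        rintro d hd ⟨h1, h2⟩
        have := hP d h2
        nlinarith
      rw [hempty _ (fun d h => by omega), hempty _ (fun d h => by omega)]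
      simp

theorem pvCountPRange (n : ℕ) (q : ℕ → Bool) :
    (List.range n).countP q = ((Finset.range n).filter (fun k => q k = true)).card := by
  rw [Finset.card_filter]
  induction n with
  | zero => simp
  | succ m ih => rw [List.range_succ, Finset.sum_range_succ, List.countP_append, ih]; simp [List.countP_cons]

-- A's divisor-list length is the divisor count
theorem pvLenEq (n : ℕ) (hn : 1 ≤ n) :
    (((PySem.List.pyRange 1 ((n : Int) + 1) 1).filter
        (fun i => PySem.Int.mod (n : Int) i == 0)).length)
    = n.divisors.card := by
  rw [PySem.List.pyRange_one]
  have h1 : (((n : Int) + 1) - 1).toNat = n := by omega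
  rw [h1, ← List.countP_eq_length_filter, List.countP_map]
  have hpred : ∀ k : ℕ, ((fun i => PySem.Int.mod (n : Int) i == 0) ∘ (fun k : ℕ => 1 + (k : ℤ))) k
      = (fun k : ℕ => decide ((k + 1) ∣ n)) k := by
    intro k
    simp only [Function.comp]
    have : (1 : ℤ) + (k : ℤ) = ((k + 1 : ℕ) : ℤ) := by push_cast; ring
    rw [this, PySem.Int.mod_natCast]
    by_cases h : (k + 1) ∣ n
    · obtain ⟨e, rfl⟩ := h
      simp [Nat.mul_mod_right]
    · have hne : n % (k + 1) ≠ 0 := fun hc => h (Nat.dvd_of_mod_eq_zero hc)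
      simp [h]
      exact fun hc => h (by exact_mod_cast hc)
  rw [List.countP_congr (fun k _ => by rw [hpred k])]
  rw [pvCountPRange]
  rw [Nat.divisors]
  apply Finset.card_nbij' (i := fun k => k + 1) (j := fun d => d - 1)
  · intro k hk
    simp only [Finset.coe_filter, Set.mem_setOf_eq, Finset.mem_range,
      Finset.mem_Ico] at hk ⊢
    obtain ⟨hlt, hdvd⟩ := hk
    exact ⟨⟨by omega, by omega⟩, by simpa using hdvd⟩
  · intro d hd
    simp only [Finset.coe_filter, Set.mem_setOf_eq, Finset.mem_range,
      Finset.mem_Ico] at hd ⊢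
    obtain ⟨⟨h1d, h2d⟩, hdvd⟩ := hd
    refine ⟨by omega, ?_⟩
    have : d - 1 + 1 = d := by omega
    rw [this]; simpa using hdvd
  · intro k _; simp
  · intro d hd
    simp only [Finset.coe_filter, Set.mem_setOf_eq, Finset.mem_Ico] at hd
    show d - 1 + 1 = d
    omega

-- restrict "1 ≤ d" away on divisors
theorem pvFilterOne (n : ℕ) (P : ℕ → Prop) [DecidablePred P] :
    n.divisors.filter (fun d => 1 ≤ d ∧ P d) = n.divisors.filter P := by
  apply Finset.filter_congr
  intro d hd
  have : 0 < d := Nat.pos_of_mem_divisors hd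
  constructor
  · rintro ⟨_, h⟩; exact h
  · intro h; exact ⟨by omega, h⟩

-- ===== VERDICT (by name: the statement is the Claim_ definition above) =====
theorem hasDivisors_spec : Claim_equal_hasDivisors := by
  intro num f _
  show hasDivisors num f = hasDivisors_alt num f
  by_cases hle : num ≤ 0
  · -- range(1, num+1) is empty, so A's condition has 7 ∈ [] and fails; B short-circuits
    rw [hasDivisors, hasDivisors_alt, if_pos (Or.inl hle),
        PySem.List.pyRange_one_eq_nil (by omega)]
    simp
  · obtain ⟨n, rfl⟩ : ∃ n : ℕ, num = (n : Int) := ⟨num.toNat, by omega⟩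
    have hn : 1 ≤ n := by exact_mod_cast (by omega : 1 ≤ (n : Int))
    rw [hasDivisors, pvDivList]
    by_cases hmod : PySem.Int.mod (n : Int) 7 = 0
    · -- 7 divides n, hence 7 ∈ A's list and both sides compare the divisor count with f
      have hm7 : PySem.Int.mod (n : Int) 7 = ((n % 7 : ℕ) : ℤ) := by
        exact_mod_cast PySem.Int.mod_natCast n 7
      have h7 : (7 : ℕ) ∣ n := by
        rw [hm7] at hmod
        exact Nat.dvd_of_mod_eq_zero (by exact_mod_cast hmod)
      have h7n : 7 ≤ n := Nat.le_of_dvd (by omega) h7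
      have hmem : (7 : Int) ∈ (PySem.List.pyRange 1 ((n : Int) + 1) 1).filter
          (fun i => PySem.Int.mod (n : Int) i == 0) := by
        rw [List.mem_filter, PySem.List.mem_pyRange_one]
        refine ⟨⟨by omega, by exact_mod_cast (by omega : (7 : ℤ) < (n : ℤ) + 1)⟩, by rw [hmod]; rfl⟩
      have hnot : ¬ ((n : Int) ≤ 0 ∨ ¬ PySem.Int.mod (n : Int) 7 = 0) := by
        rintro (h | h)
        · omega
        · exact h hmod
      rw [hasDivisors_alt, if_neg hnot]
      have hcnt : pvCountDivs (n : Int) 1 0 = ((n.divisors.card : ℕ) : Int) := by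
        have := pvCountDivsInv n hn n 1 (by omega) (by omega) 0
        rw [show ((1 : ℕ) : Int) = (1 : Int) by norm_num] at this
        rw [this, pvFilterOne, pvFilterOne, pvPairing n hn]
        push_cast; ring
      rw [pvLenEq n hn, hcnt]
      by_cases hf : ((n.divisors.card : ℕ) : Int) = f
      · rw [if_pos ⟨hf, hmem⟩]; simp [hf]
      · rw [if_neg (by rintro ⟨h, _⟩; exact hf h)]; simp [hf]
    · -- 7 does not divide n: 7 is not in A's list, both sides are false
      have hmem : (7 : Int) ∉ (PySem.List.pyRange 1 ((n : Int) + 1) 1).filter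
          (fun i => PySem.Int.mod (n : Int) i == 0) := by
        rw [List.mem_filter]
        rintro ⟨_, h⟩
        exact hmod (by simpa using h)
      rw [hasDivisors_alt, if_pos (Or.inr hmod), if_neg (by rintro ⟨_, h⟩; exact hmem h)]
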